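-- pv_equiv track=rewrite | github.com/Frittenlord/find_perfect_numbers | find_perfect_numbers.py | find_mersenne_primes
-- ===== SOURCE A (Python) =====
-- import math
--
-- def find_mersenne_primes(n: int) -> list:
--     # scenario 2 1
--     n = 1000 if n > 1000 else n
--     # Sieve of Eratosthenes to find all primes up to n
--     sieve = [True] * (n + 1)
--     sieve[0] = sieve[1] = False
--
--     for i in range(2, int(math.sqrt(n)) +1):
--         if sieve[i]:
--             for j in range(i*i, n+1, i):
--                 sieve[j] = False
--
--     primes = [ p for p in range(2, n) if sieve[p]]
--
--     mersenne_primes = []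
--     for p in primes:
--         # Bitwise operation to calculate Mersenne number (much more efficient than pow)
--         mersenne = (1 << p) - 1
--         # Check if the Mersenne number is prime and less than n
--         if mersenne < n and sieve[mersenne]:
--             mersenne_primes.append(mersenne)
--
--     return mersenne_primes
-- ===== SOURCE B (Python) =====
-- def find_mersenne_primes(n: int) -> list:
--     # Same cap as the original.
--     limit = 1000 if n > 1000 else n
--
--     def is_prime(q):
--         if q < 2:
--             return False
--         d = 2
--         while d * d <= q:
--             if q % d == 0:
--                 return False
--             d += 1
--         return True
--
--     # Enumerate Mersenne candidates 2**k - 1 directly (3, 7, 15, 31, ...)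
--     # and keep the prime ones; no sieve is needed.
--     result = []
--     q = 3  # 2**2 - 1
--     while q < limit:
--         if is_prime(q):
--             result.append(q)
--         q = 2 * q + 1
--     return result
-- ===== Notes on version B (the rewrite author's own statement) =====
-- stated objective: simpler
-- what changed: B drops the Sieve of Eratosthenes entirely: it enumerates the Mersenne candidates q = 2^k - 1 (3, 7, 15, 31, ...) directly below the capped limit and keeps those that pass a trial-division primality test, instead of sieving all numbers up to n and testing 2^p - 1 for every prime exponent p.
import Mathlib
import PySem

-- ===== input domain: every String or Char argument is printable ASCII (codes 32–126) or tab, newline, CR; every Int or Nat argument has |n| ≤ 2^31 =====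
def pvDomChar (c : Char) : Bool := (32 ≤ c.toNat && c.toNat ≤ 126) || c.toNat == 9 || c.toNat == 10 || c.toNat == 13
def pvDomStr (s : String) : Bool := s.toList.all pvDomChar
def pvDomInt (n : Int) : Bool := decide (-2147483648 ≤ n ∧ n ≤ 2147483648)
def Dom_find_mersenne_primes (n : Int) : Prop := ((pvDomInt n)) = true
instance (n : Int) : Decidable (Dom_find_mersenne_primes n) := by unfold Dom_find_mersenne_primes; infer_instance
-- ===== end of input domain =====

-- B replaces A's Sieve-of-Eratosthenes-plus-prime-exponent scan by direct trial-division
-- primality tests on the Mersenne candidates 2^k-1 themselves; equivalence of RETURN values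
-- is proved on n ≥ 1 (for n ≤ 0 the Python A raises IndexError, B returns []).

-- ===== PORT A =====

-- int(math.sqrt(n)): exact integer square root on the range 0 ≤ n ≤ 1000 that A's capped n lives in
def intSqrt (m : Nat) : Nat := go m
where go : Nat → Nat
  | 0 => 0
  | r+1 => if (r+1)*(r+1) ≤ m then r+1 else go r

-- 'for j in range(i*i, n+1, i): sieve[j] = False'
def sieveInner (nn i : Int) (s : List Bool) : List Bool :=
  (PySem.List.pyRange (i*i) (nn+1) i).foldl (fun s j => PySem.List.pySetD s j false) s

-- sieve = [True]*(n+1); sieve[0] = sieve[1] = False; then the outer 'for i in range(2, int(math.sqrt(n))+1)'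
def sieveBuild (nn : Int) : List Bool :=
  (PySem.List.pyRange 2 ((intSqrt nn.toNat : Int) + 1) 1).foldl
    (fun s i => if PySem.List.pyGetD s i false then sieveInner nn i s else s)
    (PySem.List.pySetD (PySem.List.pySetD (List.replicate (nn+1).toNat true) 0 false) 1 false)

-- the body of A after the 'n = 1000 if n > 1000 else n' cap; (1 << p) - 1 = 2^p - 1 (p ≥ 2 in the loop)
def sievePrimesMersenne (nn : Int) : List Int :=
  let sieve := sieveBuild nn
  let primes := (PySem.List.pyRange 2 nn 1).filter (fun p => PySem.List.pyGetD sieve p false)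
  primes.foldl (fun acc p =>
      let mersenne : Int := 2 ^ p.toNat - 1
      if decide (mersenne < nn) && PySem.List.pyGetD sieve mersenne false then acc ++ [mersenne]
      else acc) []

def find_mersenne_primes (n : Int) : List Int :=
  sievePrimesMersenne (if n > 1000 then 1000 else n)

-- ===== PORT B =====

-- trial-division loop 'while d*d <= q: ...'; the fuel argument is only a totality device
-- (q+1 trips always suffice, since d strictly increases and the loop stops once d*d > q)
def isPrimeLoop (q : Nat) : Nat → Nat → Bool
  | _, 0 => true
  | d, fuel+1 =>
    if d * d ≤ q then (if q % d == 0 then false else isPrimeLoop q (d+1) fuel) else true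

def isPrimeB (q : Nat) : Bool := if q < 2 then false else isPrimeLoop q 2 (q+1)

-- 'while q < limit: ...; q = 2*q + 1'; q is Python's int, always ≥ 3 here, carried as Nat;
-- the fuel argument is only a totality device (q strictly increases each trip, so
-- limit.toNat+1 trips always suffice)
def mersLoop (limit : Int) : Nat → Nat → List Int → List Int
  | _, 0, acc => acc
  | q, fuel+1, acc =>
    if (q : Int) < limit then
      mersLoop limit (2*q+1) fuel (if isPrimeB q then acc ++ [(q:Int)] else acc)
    else acc

def find_mersenne_primes_alt (n : Int) : List Int :=
  let limit := if n > 1000 then 1000 else n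
  mersLoop limit 3 (limit.toNat + 1) []

-- ===== PRECONDITION & SPEC =====
-- For n ≤ 0 the Python A raises IndexError (sieve[0]/sieve[1] on a too-short list), so those
-- inputs are excluded; A returns normally on every n ≥ 1.
def Pre_find_mersenne_primes (n : Int) : Prop := 1 ≤ n
instance (n : Int) : Decidable (Pre_find_mersenne_primes n) := by
  unfold Pre_find_mersenne_primes; infer_instance

def pvWitness_find_mersenne_primes : Int := 10

def Spec_find_mersenne_primes (n : Int) (out : List Int) : Prop := out = find_mersenne_primes_alt n
instance (n : Int) (out : List Int) : Decidable (Spec_find_mersenne_primes n out) := by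
  unfold Spec_find_mersenne_primes; infer_instance

-- ===== CLAIM (what is proved, stated in full; the proofs are below) =====
def Claim_equal_find_mersenne_primes : Prop :=
  ∀ (n : Int), Dom_find_mersenne_primes n → Pre_find_mersenne_primes n →
    Spec_find_mersenne_primes n (find_mersenne_primes n)

-- ===== LEMMAS AND PROOFS =====

-- ---- intSqrt facts ----

theorem intSqrt_go_sq_le (m : Nat) : ∀ r, intSqrt.go m r * intSqrt.go m r ≤ m := by
  intro r
  induction r with
  | zero => simp [intSqrt.go]
  | succ r ih =>
    simp only [intSqrt.go]
    split <;> simp_all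

theorem le_intSqrt_go (m d : Nat) (hd : d * d ≤ m) : ∀ r, d ≤ r → d ≤ intSqrt.go m r := by
  intro r
  induction r with
  | zero => omega
  | succ r ih =>
    intro hdr
    simp only [intSqrt.go]
    split
    · omega
    · rename_i hcond
      have : d ≠ r + 1 := by rintro rfl; omega
      exact ih (by omega)

theorem intSqrt_sq_le (m : Nat) : intSqrt m * intSqrt m ≤ m := intSqrt_go_sq_le m m

theorem le_intSqrt {m d : Nat} (hd : d * d ≤ m) : d ≤ intSqrt m := by
  have hdm : d ≤ m := by nlinarith
  exact le_intSqrt_go m d hd m hdm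

theorem intSqrt_le_self (m : Nat) : intSqrt m ≤ m := by
  have := intSqrt_sq_le m
  nlinarith

-- ---- marking loop: foldl of pySetD · false ----

theorem length_markFold (L : List Int) (s : List Bool) :
    (L.foldl (fun s j => PySem.List.pySetD s j false) s).length = s.length := by
  induction L generalizing s with
  | nil => rfl
  | cons j L ih => simp [List.foldl_cons, ih, PySem.List.length_pySetD]

theorem getD_markFold (L : List Int) (s : List Bool) (q : Nat) (hL : ∀ j ∈ L, 0 ≤ j) :
    (L.foldl (fun s j => PySem.List.pySetD s j false) s).getD q false =
      if (q : Int) ∈ L ∧ q < s.length then false else s.getD q false := by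
  induction L generalizing s with
  | nil => simp
  | cons j L ih =>
    have hj : 0 ≤ j := hL j (by simp)
    simp only [List.foldl_cons]
    rw [PySem.List.pySetD_of_nonneg _ _ hj, ih _ (fun x hx => hL x (by simp [hx]))]
    simp only [List.length_set]
    by_cases hmem : (q : Int) ∈ L ∧ q < s.length
    · simp [hmem, hmem.1, hmem.2]
    · rw [if_neg hmem]
      by_cases hq : q < s.length
      · by_cases hjq : j.toNat = q
        · have hjq' : j = (q : Int) := by omega
          rw [if_pos ⟨by simp [hjq'], hq⟩]
          subst hjq
          simp [List.getD_eq_getElem?_getD, List.getElem?_set, hq]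
        · have hne : j ≠ (q : Int) := by omega
          rw [if_neg (by
            rintro ⟨hm, -⟩
            rcases List.mem_cons.mp hm with h | h
            · exact hne h.symm
            · exact hmem ⟨h, hq⟩)]
          simp [List.getD_eq_getElem?_getD, List.getElem?_set, hjq]
      · rw [if_neg (by rintro ⟨-, h⟩; exact hq h)]
        rw [List.getD_eq_default _ _ (by simpa using Nat.le_of_not_lt hq),
            List.getD_eq_default _ _ (by omega)]

-- ---- sieve characterization ----

abbrev goodUpto (t q : Nat) : Prop := 2 ≤ q ∧ ∀ d, 2 ≤ d → d < t → ¬(d ∣ q ∧ d * d ≤ q)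

theorem sieve_inv (nn : Int) (hnn : 1 ≤ nn) (k : Nat)
    (hk : 2 + k ≤ intSqrt nn.toNat + 1) :
    ((PySem.List.pyRange 2 ((2 + k : Nat) : Int) 1).foldl
        (fun s i => if PySem.List.pyGetD s i false then sieveInner nn i s else s)
        (PySem.List.pySetD (PySem.List.pySetD (List.replicate (nn+1).toNat true) 0 false) 1 false)).length
      = nn.toNat + 1 ∧
    ∀ q : Nat, q ≤ nn.toNat →
      ((PySem.List.pyRange 2 ((2 + k : Nat) : Int) 1).foldl
        (fun s i => if PySem.List.pyGetD s i false then sieveInner nn i s else s)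
        (PySem.List.pySetD (PySem.List.pySetD (List.replicate (nn+1).toNat true) 0 false) 1 false)).getD q false
      = decide (goodUpto (2 + k) q) := by
  induction k with
  | zero =>
    have hrange : PySem.List.pyRange 2 ((2+0:Nat):Int) 1 = [] := by
      rw [show ((2+0:Nat):Int) = 2 from by norm_num]
      exact PySem.List.pyRange_one_eq_nil le_rfl
    rw [hrange]
    simp only [List.foldl_nil]
    have hlen1 : (nn+1).toNat = nn.toNat + 1 := by omega
    have hN : 1 ≤ nn.toNat := by omega
    rw [PySem.List.pySetD_of_nonneg _ _ (by norm_num : (0:Int) ≤ 1),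
        PySem.List.pySetD_of_nonneg _ _ (le_refl (0:Int))]
    simp only [Int.toNat_one, Int.toNat_zero]
    constructor
    · simp [hlen1]
    · intro q hq
      have hg : goodUpto (2+0) q ↔ 2 ≤ q := by
        unfold goodUpto
        exact ⟨fun h => h.1, fun h => ⟨h, fun d hd hdt => by omega⟩⟩
      rcases Nat.lt_or_ge q 2 with hq2 | hq2
      · interval_cases q <;>
          simp [List.getD_eq_getElem?_getD, List.getElem?_set, List.length_set,
                List.length_replicate, hlen1, hg, hN, (show (0:Int) < nn from by omega)]
      · have h0 : (0:Nat) ≠ q := by omega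
        have h1 : (1:Nat) ≠ q := by omega
        simp [List.getD_eq_getElem?_getD, List.getElem?_set, h0, h1, hg, hq2,
              List.getElem?_replicate, hlen1, Nat.lt_succ_of_le hq]
  | succ k ih =>
    have hg2 : 2 ≤ 2 + k := by omega
    obtain ⟨ihlen, ihget⟩ := ih (by omega)
    have hcast : ((2+(k+1):Nat):Int) = ((2+k:Nat):Int) + 1 := by push_cast; ring
    rw [hcast, PySem.List.pyRange_one_succ_right (by push_cast; omega), List.foldl_append]
    simp only [List.foldl_cons, List.foldl_nil]
    have htle : 2 + k ≤ intSqrt nn.toNat := by omega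
    have htN : 2 + k ≤ nn.toNat := le_trans htle (intSqrt_le_self _)
    have hguard : PySem.List.pyGetD
        ((PySem.List.pyRange 2 ((2 + k : Nat) : Int) 1).foldl
          (fun s i => if PySem.List.pyGetD s i false then sieveInner nn i s else s)
          (PySem.List.pySetD (PySem.List.pySetD (List.replicate (nn+1).toNat true) 0 false) 1 false))
        ((2+k : Nat) : Int) false = decide (goodUpto (2+k) (2+k)) := by
      rw [PySem.List.pyGetD_natCast]
      exact ihget (2+k) htN
    by_cases hgood : goodUpto (2+k) (2+k)
    · rw [hguard, if_pos (decide_eq_true hgood)]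
      have hstep : (0:Int) < ((2+k:Nat):Int) := by push_cast; omega
      have hLpos : ∀ j ∈ PySem.List.pyRange (((2+k:Nat):Int)*((2+k:Nat):Int)) (nn+1) ((2+k:Nat):Int), 0 ≤ j := by
        intro j hj
        have hm := (PySem.List.mem_pyRange_iff_of_pos hstep j).mp hj
        nlinarith [hm.1]
      constructor
      · rw [sieveInner, length_markFold]; exact ihlen
      · intro q hq
        rw [sieveInner, getD_markFold _ _ _ hLpos, ihlen, ihget q hq]
        have hmem : ((q:Int) ∈ PySem.List.pyRange (((2+k:Nat):Int)*((2+k:Nat):Int)) (nn+1) ((2+k:Nat):Int))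
            ↔ ((2+k) ∣ q ∧ (2+k)*(2+k) ≤ q) := by
          rw [PySem.List.mem_pyRange_iff_of_pos hstep]
          constructor
          · rintro ⟨hle, hlt, hdvd⟩
            have hdq : ((2+k:Nat):Int) ∣ (q:Int) := by
              have h1 : ((2+k:Nat):Int) ∣ ((2+k:Nat):Int)*((2+k:Nat):Int) := Dvd.intro _ rfl
              have h2 := dvd_add hdvd h1
              simpa using h2
            exact ⟨by exact_mod_cast hdq, by exact_mod_cast hle⟩
          · rintro ⟨hdvd, hle⟩
            refine ⟨by exact_mod_cast hle, by omega, ?_⟩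
            have hdq : ((2+k:Nat):Int) ∣ (q:Int) := by exact_mod_cast hdvd
            exact dvd_sub hdq (Dvd.intro _ rfl)
        have hql : q < nn.toNat + 1 := by omega
        by_cases hc : (2+k) ∣ q ∧ (2+k)*(2+k) ≤ q
        · rw [if_pos ⟨hmem.mpr hc, hql⟩]
          have hng : ¬ goodUpto (2+(k+1)) q := by
            unfold goodUpto
            rintro ⟨h2, hall⟩
            exact hall (2+k) hg2 (by omega) hc
          simp [hng]
        · rw [if_neg (by rintro ⟨hm, -⟩; exact hc (hmem.mp hm))]
          have hiff : goodUpto (2+(k+1)) q ↔ goodUpto (2+k) q := by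
            unfold goodUpto
            constructor
            · rintro ⟨h2, hall⟩
              exact ⟨h2, fun d hd hdt hdq => hall d hd (by omega) hdq⟩
            · rintro ⟨h2, hall⟩
              refine ⟨h2, fun d hd hdt hdq => ?_⟩
              rcases Nat.lt_or_ge d (2+k) with h | h
              · exact hall d hd h hdq
              · have hdt' : d = 2+k := by omega
                subst hdt'
                exact hc hdq
          rw [decide_eq_decide.mpr hiff]
    · rw [hguard, if_neg (fun h => hgood (of_decide_eq_true h))]
      have hbad : ∃ d, 2 ≤ d ∧ d < 2+k ∧ d ∣ (2+k) ∧ d*d ≤ 2+k := by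
        unfold goodUpto at hgood
        push_neg at hgood
        obtain ⟨d, hd2, hdt, hdc⟩ := hgood hg2
        exact ⟨d, hd2, hdt, hdc.1, hdc.2⟩
      obtain ⟨d, hd2, hdt, hddvd, hdsq⟩ := hbad
      constructor
      · exact ihlen
      · intro q hq
        rw [ihget q hq]
        have hiff : goodUpto (2+(k+1)) q ↔ goodUpto (2+k) q := by
          unfold goodUpto
          constructor
          · rintro ⟨h2, hall⟩
            exact ⟨h2, fun e he het heq => hall e he (by omega) heq⟩
          · rintro ⟨h2, hall⟩
            refine ⟨h2, fun e he het heq => ?_⟩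
            rcases Nat.lt_or_ge e (2+k) with h | h
            · exact hall e he h heq
            · have het' : e = 2+k := by omega
              subst het'
              refine hall d hd2 hdt ⟨dvd_trans hddvd heq.1, ?_⟩
              have h1 : 2+k ≤ (2+k)*(2+k) := Nat.le_mul_of_pos_left _ (by omega)
              omega
        rw [decide_eq_decide.mpr hiff]

theorem sieveBuild_getD (nn : Int) (hnn : 1 ≤ nn) (q : Nat) (hq : q ≤ nn.toNat) :
    (sieveBuild nn).getD q false = decide (Nat.Prime q) := by
  have hs1 : 1 ≤ intSqrt nn.toNat := le_intSqrt (m := nn.toNat) (d := 1) (by omega)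
  have hk := sieve_inv nn hnn (intSqrt nn.toNat - 1) (by omega)
  unfold sieveBuild
  rw [show ((intSqrt nn.toNat : Nat):Int) + 1 = ((2 + (intSqrt nn.toNat - 1) : Nat) : Int) from by omega]
  rw [hk.2 q hq]
  have hiff : goodUpto (2 + (intSqrt nn.toNat - 1)) q ↔ Nat.Prime q := by
    rw [show 2 + (intSqrt nn.toNat - 1) = intSqrt nn.toNat + 1 from by omega]
    unfold goodUpto
    constructor
    · rintro ⟨h2, hall⟩
      by_contra hnp
      have hdvd := Nat.minFac_dvd q
      have hdp : Nat.Prime q.minFac := Nat.minFac_prime (by omega)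
      have hsq : q.minFac ^ 2 ≤ q := Nat.minFac_sq_le_self (by omega) hnp
      rw [pow_two] at hsq
      have hle : q.minFac ≤ intSqrt nn.toNat := le_intSqrt (le_trans hsq hq)
      exact hall q.minFac hdp.two_le (by omega) ⟨hdvd, hsq⟩
    · intro hp
      refine ⟨hp.two_le, fun d hd hdt hdq => ?_⟩
      rcases (Nat.Prime.eq_one_or_self_of_dvd hp d hdq.1) with h | h
      · omega
      · subst h
        nlinarith [hp.two_le, hdq.2]
  rw [decide_eq_decide.mpr hiff]

-- ---- A characterization ----

theorem acore_eq (nn : Int) (h1 : 1 ≤ nn) (h2 : nn ≤ 1000) :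
    sievePrimesMersenne nn = ([3, 7, 31, 127] : List Int).filter (fun m => decide (m < nn)) := by
  have hrw : sievePrimesMersenne nn =
      ((PySem.List.pyRange 2 nn 1).filter
          (fun p => PySem.List.pyGetD (sieveBuild nn) p false)).foldl
        (fun acc p =>
          if decide ((2:Int) ^ p.toNat - 1 < nn) &&
              PySem.List.pyGetD (sieveBuild nn) ((2:Int) ^ p.toNat - 1) false then
            acc ++ [(2:Int) ^ p.toNat - 1]
          else acc) [] := rfl
  rw [hrw]
  rw [PySem.List.foldl_append_if
        (fun p => decide ((2:Int) ^ p.toNat - 1 < nn) &&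
          PySem.List.pyGetD (sieveBuild nn) ((2:Int) ^ p.toNat - 1) false)
        (fun p => (2:Int) ^ p.toNat - 1)
        ((PySem.List.pyRange 2 nn 1).filter
          (fun p => PySem.List.pyGetD (sieveBuild nn) p false)) []]
  rw [List.filter_filter, List.nil_append]
  have hget := sieveBuild_getD nn h1
  have hfilter : (PySem.List.pyRange 2 nn 1).filter
        (fun a => (decide ((2:Int) ^ a.toNat - 1 < nn) &&
            PySem.List.pyGetD (sieveBuild nn) ((2:Int) ^ a.toNat - 1) false) &&
          PySem.List.pyGetD (sieveBuild nn) a false) =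
      ([2, 3, 5, 7] : List Int).filter (fun p => decide ((2:Int) ^ p.toNat - 1 < nn)) := by
    refine List.eq_of_perm_of_sorted
      (le := (· < ·)) (fun a b _ _ hab hba => absurd hba (lt_asymm hab))
      (List.Pairwise.filter _ (PySem.List.pairwise_lt_pyRange_one 2 nn))
      (List.Pairwise.filter _ (by decide)) ?_
    rw [List.perm_ext_iff_of_nodup
      (List.Nodup.filter _ (PySem.List.nodup_pyRange_one 2 nn))
      (List.Nodup.filter _ (by decide))]
    intro x
    rw [List.mem_filter, List.mem_filter, PySem.List.mem_pyRange_one]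
    constructor
    · rintro ⟨⟨hx2, hxnn⟩, hR⟩
      simp only [Bool.and_eq_true, decide_eq_true_eq] at hR
      obtain ⟨⟨hfx, hgf⟩, hgx⟩ := hR
      have hx0 : 0 ≤ x := by omega
      have hfpos : (0:Int) ≤ (2:Int) ^ x.toNat - 1 := by
        have := pow_pos (by norm_num : (0:Int) < 2) x.toNat
        omega
      rw [PySem.List.pyGetD_of_nonneg _ _ hx0, hget x.toNat (by omega)] at hgx
      rw [PySem.List.pyGetD_of_nonneg _ _ hfpos, hget _ (by omega)] at hgf
      have hpx : Nat.Prime x.toNat := by simpa using hgx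
      have hpf : Nat.Prime ((2:Int) ^ x.toNat - 1).toNat := by simpa using hgf
      have hk9 : x.toNat ≤ 9 := by
        by_contra hcon
        have h10 : (2:Nat) ^ 10 ≤ 2 ^ x.toNat := Nat.pow_le_pow_right (by norm_num) (by omega)
        have hcast : ((2:Nat) ^ x.toNat : Int) = (2:Int) ^ x.toNat := by push_cast; ring
        omega
      have hk2 : 2 ≤ x.toNat := by omega
      have hxk : x = (x.toNat : Int) := by omega
      set k := x.toNat with hkdef
      interval_cases k <;>
        first
          | exact absurd hpx (by decide)
          | exact ⟨by rw [hxk]; norm_num, by simpa using hfx⟩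
    · intro hx
      obtain ⟨hmem, hfx⟩ := hx
      have hfx' := of_decide_eq_true hfx
      have hmem' : x = 2 ∨ x = 3 ∨ x = 5 ∨ x = 7 := by simpa using hmem
      have hprime : ∀ (y : Int), 0 ≤ y → y < nn → PySem.List.pyGetD (sieveBuild nn) y false = decide (Nat.Prime y.toNat) := by
        intro y hy0 hy
        rw [PySem.List.pyGetD_of_nonneg _ _ hy0, hget y.toNat (by omega)]
      have hstep : ∀ (y m : Int), ((2:Int) ^ y.toNat - 1) = m → 2 ≤ y → y ≤ m →
          ((2:Int) ^ y.toNat - 1) < nn → Nat.Prime y.toNat → Nat.Prime m.toNat →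
          (2 ≤ y ∧ y < nn) ∧ ((decide ((2:Int) ^ y.toNat - 1 < nn) &&
            PySem.List.pyGetD (sieveBuild nn) ((2:Int) ^ y.toNat - 1) false) &&
            PySem.List.pyGetD (sieveBuild nn) y false) = true := by
        intro y m hf hy2 hym hlt hpy hpm
        rw [hf] at hlt
        refine ⟨⟨hy2, by omega⟩, ?_⟩
        rw [hf]
        simp only [Bool.and_eq_true, decide_eq_true_eq]
        refine ⟨⟨hlt, ?_⟩, ?_⟩
        · rw [hprime m (by omega) hlt]
          simp [hpm]
        · rw [hprime y (by omega) (by omega)]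
          simp [hpy]
      rcases hmem' with rfl | rfl | rfl | rfl
      · exact hstep 2 3 (by decide) (by norm_num) (by norm_num)
          (by simpa using hfx') (by decide) (by decide)
      · exact hstep 3 7 (by decide) (by norm_num) (by norm_num)
          (by simpa using hfx') (by decide) (by decide)
      · exact hstep 5 31 (by decide) (by norm_num) (by norm_num)
          (by simpa using hfx') (by decide) (by decide)
      · exact hstep 7 127 (by decide) (by norm_num) (by norm_num)
          (by simpa using hfx') (by decide) (by decide)
  rw [hfilter]
  by_cases c3 : (4:Int) ≤ nn <;> by_cases c7 : (8:Int) ≤ nn <;>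
    by_cases c31 : (32:Int) ≤ nn <;> by_cases c127 : (128:Int) ≤ nn <;>
    norm_num [List.filter_cons, List.filter_nil, c3, c7, c31, c127,
      (show Int.toNat 2 = 2 from rfl), (show Int.toNat 3 = 3 from rfl),
      (show Int.toNat 5 = 5 from rfl), (show Int.toNat 7 = 7 from rfl)] <;>
    (try split_ifs <;> first | rfl | omega)

-- ---- B characterization ----

theorem mersLoop_stop (limit : Int) (q fuel : Nat) (acc : List Int) (h : ¬ ((q : Int) < limit)) :
    mersLoop limit q (fuel+1) acc = acc := by
  simp [mersLoop, h]

theorem mersLoop_step (limit : Int) (q fuel : Nat) (acc : List Int) (h : (q : Int) < limit) :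
    mersLoop limit q (fuel+1) acc =
      mersLoop limit (2*q+1) fuel (if isPrimeB q then acc ++ [(q:Int)] else acc) := by
  simp [mersLoop, h]

theorem mersLoop_fuel_eq (limit : Int) :
    ∀ (f g q : Nat) (acc : List Int), limit ≤ (q : Int) + f → limit ≤ (q : Int) + g →
      mersLoop limit q f acc = mersLoop limit q g acc := by
  intro f
  induction f with
  | zero =>
    intro g q acc hf hg
    cases g with
    | zero => rfl
    | succ g => rw [mersLoop_stop _ _ _ _ (by push_cast at hf ⊢; omega)]; rfl
  | succ f ih =>
    intro g q acc hf hg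
    cases g with
    | zero =>
      rw [mersLoop_stop _ _ _ _ (by push_cast at hg ⊢; omega)]; rfl
    | succ g =>
      by_cases h : (q : Int) < limit
      · rw [mersLoop_step _ _ _ _ h, mersLoop_step _ _ _ _ h]
        exact ih g (2*q+1) _ (by push_cast at hf ⊢; omega) (by push_cast at hg ⊢; omega)
      · rw [mersLoop_stop _ _ _ _ h, mersLoop_stop _ _ _ _ h]

theorem bcore_eq (limit : Int) (h1 : 1 ≤ limit) (h2 : limit ≤ 1000) :
    mersLoop limit 3 (limit.toNat + 1) [] =
      ([3, 7, 31, 127] : List Int).filter (fun m => decide (m < limit)) := by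
  rw [mersLoop_fuel_eq limit (limit.toNat + 1) 1021 3 [] (by push_cast; omega) (by push_cast; omega)]
  by_cases h3 : (3:Int) < limit
  · rw [show (1021 : Nat) = 1020 + 1 from rfl,
        mersLoop_step _ _ _ _ (by exact_mod_cast h3)]
    norm_num [show isPrimeB 3 = true from by decide]
    by_cases h7 : (7:Int) < limit
    · rw [show (1020 : Nat) = 1019 + 1 from rfl,
          mersLoop_step _ _ _ _ (by exact_mod_cast h7)]
      norm_num [show isPrimeB 7 = true from by decide]
      by_cases h15 : (15:Int) < limit
      · rw [show (1019 : Nat) = 1018 + 1 from rfl,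
            mersLoop_step _ _ _ _ (by exact_mod_cast h15)]
        norm_num [show isPrimeB 15 = false from by decide]
        by_cases h31 : (31:Int) < limit
        · rw [show (1018 : Nat) = 1017 + 1 from rfl,
              mersLoop_step _ _ _ _ (by exact_mod_cast h31)]
          norm_num [show isPrimeB 31 = true from by decide]
          by_cases h63 : (63:Int) < limit
          · rw [show (1017 : Nat) = 1016 + 1 from rfl,
                mersLoop_step _ _ _ _ (by exact_mod_cast h63)]
            norm_num [show isPrimeB 63 = false from by decide]
            by_cases h127 : (127:Int) < limit
            · rw [show (1016 : Nat) = 1015 + 1 from rfl,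
                  mersLoop_step _ _ _ _ (by exact_mod_cast h127)]
              norm_num [show isPrimeB 127 = true from by decide]
              by_cases h255 : (255:Int) < limit
              · rw [show (1015 : Nat) = 1014 + 1 from rfl,
                    mersLoop_step _ _ _ _ (by exact_mod_cast h255)]
                norm_num [show isPrimeB 255 = false from by decide]
                by_cases h511 : (511:Int) < limit
                · rw [show (1014 : Nat) = 1013 + 1 from rfl,
                      mersLoop_step _ _ _ _ (by exact_mod_cast h511)]
                  norm_num [show isPrimeB 511 = false from by decide]
                  rw [show (1013 : Nat) = 1012 + 1 from rfl,
                      mersLoop_stop _ _ _ _ (by push_cast; omega)]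
                  simp [List.filter, h3, h7, h31, h127]
                · rw [show (1014 : Nat) = 1013 + 1 from rfl,
                      mersLoop_stop _ _ _ _ (by exact_mod_cast h511)]
                  simp [List.filter, h3, h7, h31, h127]
              · rw [show (1015 : Nat) = 1014 + 1 from rfl,
                    mersLoop_stop _ _ _ _ (by exact_mod_cast h255)]
                simp [List.filter, h3, h7, h31, h127]
            · rw [show (1016 : Nat) = 1015 + 1 from rfl,
                  mersLoop_stop _ _ _ _ (by exact_mod_cast h127)]
              simp [List.filter, h3, h7, h31, h127]
          · rw [show (1017 : Nat) = 1016 + 1 from rfl,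
                mersLoop_stop _ _ _ _ (by exact_mod_cast h63)]
            have h127 : ¬ (127:Int) < limit := by omega
            simp [List.filter, h3, h7, h31, h127]
        · rw [show (1018 : Nat) = 1017 + 1 from rfl,
              mersLoop_stop _ _ _ _ (by exact_mod_cast h31)]
          have h127 : ¬ (127:Int) < limit := by omega
          simp [List.filter, h3, h7, h31, h127]
      · rw [show (1019 : Nat) = 1018 + 1 from rfl,
            mersLoop_stop _ _ _ _ (by exact_mod_cast h15)]
        have h31 : ¬ (31:Int) < limit := by omega
        have h127 : ¬ (127:Int) < limit := by omega
        simp [List.filter, h3, h7, h31, h127]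
    · rw [show (1020 : Nat) = 1019 + 1 from rfl,
          mersLoop_stop _ _ _ _ (by exact_mod_cast h7)]
      have h31 : ¬ (31:Int) < limit := by omega
      have h127 : ¬ (127:Int) < limit := by omega
      simp [List.filter, h3, h7, h31, h127]
  · rw [show (1021 : Nat) = 1020 + 1 from rfl,
        mersLoop_stop _ _ _ _ (by exact_mod_cast h3)]
    have h7 : ¬ (7:Int) < limit := by omega
    have h31 : ¬ (31:Int) < limit := by omega
    have h127 : ¬ (127:Int) < limit := by omega
    simp [List.filter, h3, h7, h31, h127]

-- ===== VERDICT (by name: the statement is the Claim_ definition above) =====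
theorem find_mersenne_primes_spec : Claim_equal_find_mersenne_primes := by
  intro n _hdom hpre
  unfold Spec_find_mersenne_primes find_mersenne_primes find_mersenne_primes_alt
  have hpre' : 1 ≤ n := hpre
  set nn := if n > 1000 then 1000 else n with hnn
  have hb1 : 1 ≤ nn := by rw [hnn]; split <;> omega
  have hb2 : nn ≤ 1000 := by rw [hnn]; split <;> omega
  simp only []
  rw [acore_eq nn hb1 hb2, bcore_eq nn hb1 hb2]
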